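-- pv_equiv track=rewrite | github.com/benaissazaki/chat-toolkit | modules/lyrics.py | clean_raw_lyrics
-- ===== SOURCE A (Python) =====
-- def clean_raw_lyrics(raw_lyrics: str) -> str:
--     ''' Nicely format raw_lyrics '''
--
--     cleaned_lyrics = ''
--     delete_linebreak_mode = False
--
--     for character in raw_lyrics:
--         if character == '[' and len(cleaned_lyrics) != 0 and cleaned_lyrics[-1] != '\n':
--             # Add linebreak before '[' if it isn't there already
--             cleaned_lyrics += '\n'
--
--         if character in ['[', '(']:
--             delete_linebreak_mode = True
--
--         if character in [']', ')']:
--             delete_linebreak_mode = False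
--
--         if (character == '\n' and delete_linebreak_mode):
--             # Delete linebreaks between '()' and '[]'
--             continue
--
--         cleaned_lyrics += character
--
--     return cleaned_lyrics
-- ===== SOURCE B (Python) =====
-- def clean_raw_lyrics(raw_lyrics: str) -> str:
--     ''' Nicely format raw_lyrics '''
--     # Pass 1: drop input newlines that occur while inside brackets/parens.
--     stripped = []
--     mode = False
--     for c in raw_lyrics:
--         if c in '[(':
--             mode = True
--         elif c in '])':
--             mode = False
--         if c == '\n' and mode:
--             continue
--         stripped.append(c)
--     # Pass 2: ensure a linebreak immediately before each '['.
--     out = []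
--     for c in stripped:
--         if c == '[' and out and out[-1] != '\n':
--             out.append('\n')
--         out.append(c)
--     return ''.join(out)
-- ===== Notes on version B (the rewrite author's own statement) =====
-- stated objective: alternative
-- what changed: Replaces A's single loop with interleaved state by two independent passes: pass 1 strips newlines occurring inside brackets/parentheses, pass 2 inserts a linebreak before each opening square bracket; output built as a char list joined once instead of repeated string concatenation.
import Mathlib
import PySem

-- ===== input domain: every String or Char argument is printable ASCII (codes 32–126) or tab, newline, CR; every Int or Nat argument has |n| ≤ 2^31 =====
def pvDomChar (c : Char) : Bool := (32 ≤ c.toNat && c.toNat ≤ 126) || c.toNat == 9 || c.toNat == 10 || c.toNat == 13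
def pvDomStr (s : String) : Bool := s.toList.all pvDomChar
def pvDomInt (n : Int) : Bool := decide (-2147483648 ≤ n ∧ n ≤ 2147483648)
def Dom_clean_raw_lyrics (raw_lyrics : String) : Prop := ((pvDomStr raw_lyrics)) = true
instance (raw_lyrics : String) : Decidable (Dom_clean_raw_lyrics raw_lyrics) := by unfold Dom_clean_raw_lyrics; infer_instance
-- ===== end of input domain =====

-- B replaces A's single stateful loop by two independent passes (strip newlines inside
-- brackets, then insert a '\n' before each '['); objective: alternative decomposition.

-- ===== PORT A =====
-- single loop over the characters, state = (output so far, delete_linebreak_mode)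
def pvALoop (l : List Char) (mode : Bool) (acc : List Char) : List Char :=
  match l with
  | [] => acc
  | c :: t =>
    let acc1 := if c = '[' ∧ acc ≠ [] ∧ acc.getLast? ≠ some '\n' then acc ++ ['\n'] else acc
    let mode1 := if c = '[' ∨ c = '(' then true else mode
    let mode2 := if c = ']' ∨ c = ')' then false else mode1
    if c = '\n' ∧ mode2 then pvALoop t mode2 acc1
    else pvALoop t mode2 (acc1 ++ [c])

def clean_raw_lyrics (raw_lyrics : String) : String :=
  String.ofList (pvALoop raw_lyrics.toList false [])

-- ===== PORT B =====
-- pass 1: drop input newlines occurring while inside brackets/parens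
def pvStrip (l : List Char) (mode : Bool) (acc : List Char) : List Char :=
  match l with
  | [] => acc
  | c :: t =>
    let mode' := if c = '[' ∨ c = '(' then true
                 else if c = ']' ∨ c = ')' then false else mode
    if c = '\n' ∧ mode' then pvStrip t mode' acc
    else pvStrip t mode' (acc ++ [c])

-- pass 2: ensure a linebreak immediately before each '['
def pvBreaks (l : List Char) (out : List Char) : List Char :=
  match l with
  | [] => out
  | c :: t =>
    let out' := if c = '[' ∧ out ≠ [] ∧ out.getLast? ≠ some '\n' then out ++ ['\n'] else out
    pvBreaks t (out' ++ [c])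

def clean_raw_lyrics_alt (raw_lyrics : String) : String :=
  String.ofList (pvBreaks (pvStrip raw_lyrics.toList false []) [])

-- ===== PRECONDITION & SPEC =====
def Spec_clean_raw_lyrics (raw_lyrics : String) (out : String) : Prop := out = clean_raw_lyrics_alt raw_lyrics
instance (raw_lyrics : String) (out : String) : Decidable (Spec_clean_raw_lyrics raw_lyrics out) := by unfold Spec_clean_raw_lyrics; infer_instance

-- ===== CLAIM (what is proved, stated in full; the proofs are below) =====
def Claim_equal_clean_raw_lyrics : Prop := ∀ (raw_lyrics : String), Dom_clean_raw_lyrics raw_lyrics → Spec_clean_raw_lyrics raw_lyrics (clean_raw_lyrics raw_lyrics)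

-- ===== LEMMAS AND PROOFS =====

-- pass 2 is a left fold: it distributes over append
theorem pvBreaks_append (xs ys : List Char) (out : List Char) :
    pvBreaks (xs ++ ys) out = pvBreaks ys (pvBreaks xs out) := by
  induction xs generalizing out with
  | nil => rfl
  | cons c t ih => simp [pvBreaks, ih]

-- invariant: A's accumulator is pass 2 applied to pass 1's accumulator
theorem pvALoop_eq (l : List Char) (mode : Bool) (S : List Char) :
    pvALoop l mode (pvBreaks S []) = pvBreaks (pvStrip l mode S) [] := by
  induction l generalizing mode S with
  | nil => rfl
  | cons c t ih =>
    by_cases hb : c = '\n' ∧ (if c = ']' ∨ c = ')' then false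
        else if c = '[' ∨ c = '(' then true else mode) = true
    · -- the newline is skipped by both versions
      obtain ⟨hc, hm⟩ := hb
      subst hc
      have hm' : mode = true := by simpa using hm
      subst hm'
      rw [pvALoop, pvStrip]
      norm_num
      exact ih true S
    · -- the character is appended; relate via pvBreaks_append on S ++ [c]
      rw [pvALoop, pvStrip]
      have hmode : (if c = ']' ∨ c = ')' then false else if c = '[' ∨ c = '(' then true else mode)
          = (if c = '[' ∨ c = '(' then true else if c = ']' ∨ c = ')' then false else mode) := by
        by_cases h2 : c = ']' ∨ c = ')'
        · have h1 : ¬ (c = '[' ∨ c = '(') := by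
            rcases h2 with h | h <;> subst h <;> decide
          simp [h1, h2]
        · simp [h2]
      have hb' : ¬ (c = '\n' ∧ (if c = '[' ∨ c = '(' then true
          else if c = ']' ∨ c = ')' then false else mode) = true) := by
        rw [← hmode]; exact hb
      rw [if_neg hb']
      have hb2 : ¬ (c = '\n' ∧ (if c = '[' ∨ c = '(' then true
          else (if c = ']' ∨ c = ')' then false else mode)) = true) := hb'
      simp only [hmode]
      rw [if_neg hb2]
      have : pvBreaks (S ++ [c]) [] =
          (if c = '[' ∧ pvBreaks S [] ≠ [] ∧ (pvBreaks S []).getLast? ≠ some '\n'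
            then pvBreaks S [] ++ ['\n'] else pvBreaks S []) ++ [c] := by
        rw [pvBreaks_append]; rfl
      rw [← ih _ (S ++ [c]), this]

-- ===== VERDICT (by name: the statement is the Claim_ definition above) =====
theorem clean_raw_lyrics_spec : Claim_equal_clean_raw_lyrics := by
  intro raw _
  show clean_raw_lyrics raw = clean_raw_lyrics_alt raw
  unfold clean_raw_lyrics clean_raw_lyrics_alt
  exact congrArg String.ofList (pvALoop_eq raw.toList false [])
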